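-- pv_equiv track=rewrite | github.com/francoding/proyecto_django | excercise_2.py | contar_pal_xy
-- ===== SOURCE A (Python) =====
-- def contar_pal_xy(texto):
--     ''' Determinar cuantas palabras tenian al menos una vez la letra "x" o la letra "y".'''
--     cant_pal_xy = 0
--     flag = False
--     for i in texto:
--         if i != ' ' and i != '.':
--             if (i == 'y' or i == 'x') and flag == False:
--                 cant_pal_xy += 1
--                 flag = True
--         elif i == ' ':
--             flag = False
--     return cant_pal_xy
-- ===== SOURCE B (Python) =====
-- def contar_pal_xy(texto):
--     ''' Determinar cuantas palabras tenian al menos una vez la letra "x" o la letra "y".'''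
--     return sum(('x' in w) or ('y' in w) for w in texto.split(' '))
-- ===== Notes on version B (the rewrite author's own statement) =====
-- stated objective: idiomatic
-- what changed: Replaced the character-by-character flag state machine with split-then-test: split the text on single spaces and count the segments that contain the letter x or the letter y (a dot never resets A's flag, so it is simply inert).
import Mathlib
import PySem

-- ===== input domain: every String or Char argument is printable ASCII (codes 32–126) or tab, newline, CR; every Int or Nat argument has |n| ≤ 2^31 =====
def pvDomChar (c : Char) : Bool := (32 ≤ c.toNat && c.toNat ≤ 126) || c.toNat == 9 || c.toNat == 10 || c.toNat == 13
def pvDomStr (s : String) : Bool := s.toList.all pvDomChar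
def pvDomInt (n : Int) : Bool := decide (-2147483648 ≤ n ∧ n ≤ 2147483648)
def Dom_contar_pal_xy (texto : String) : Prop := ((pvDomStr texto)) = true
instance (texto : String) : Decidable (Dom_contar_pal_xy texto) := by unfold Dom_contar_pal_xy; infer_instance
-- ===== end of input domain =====

-- B replaces A's char-by-char flag state machine with the idiomatic split-then-test
-- (count space-delimited segments containing 'x' or 'y'); same cost, plainer code.

-- ===== PORT A =====
-- one step of A's loop body: state = (cant_pal_xy, flag)
def pvStepA (st : Int × Bool) (i : Char) : Int × Bool :=
  if i ≠ ' ' ∧ i ≠ '.' then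
    if (i = 'y' ∨ i = 'x') ∧ st.2 = false then (st.1 + 1, true) else st
  else if i = ' ' then (st.1, false) else st

def contar_pal_xy (texto : String) : Int :=
  (texto.toList.foldl pvStepA (0, false)).1

-- ===== PORT B =====
-- ('x' in w) or ('y' in w), as the 0/1 summand of Source B's sum
def pvHit (w : List Char) : Int :=
  if PySem.Chars.isIn ['x'] w || PySem.Chars.isIn ['y'] w then 1 else 0

def contar_pal_xy_alt (texto : String) : Int :=
  ((texto.toList.splitOn ' ').map pvHit).sum

-- ===== PRECONDITION & SPEC =====
def Spec_contar_pal_xy (texto : String) (out : Int) : Prop := out = contar_pal_xy_alt texto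
instance (texto : String) (out : Int) : Decidable (Spec_contar_pal_xy texto out) := by unfold Spec_contar_pal_xy; infer_instance

-- ===== CLAIM (what is proved, stated in full; the proofs are below) =====
def Claim_equal_contar_pal_xy : Prop := ∀ (texto : String), Dom_contar_pal_xy texto → Spec_contar_pal_xy texto (contar_pal_xy texto)

-- ===== LEMMAS AND PROOFS =====

lemma pvHit_eq (w : List Char) : pvHit w = if 'x' ∈ w ∨ 'y' ∈ w then 1 else 0 := by
  simp [pvHit, PySem.Chars.isIn_iff_infix, List.singleton_infix_iff]

lemma pvHit_nil : pvHit [] = 0 := by decide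

-- loop invariant: A's fold from (c, flag) equals c plus B's per-segment count,
-- with the first segment suppressed when flag is already set
lemma pvFoldA_eq (cs : List Char) : ∀ (c : Int) (flag : Bool),
    (cs.foldl pvStepA (c, flag)).1 =
      c + (((cs.splitOn ' ').tail.map pvHit).sum +
        (if flag then 0 else pvHit (cs.splitOn ' ').headI)) := by
  induction cs with
  | nil => intro c flag; cases flag <;> simp [List.splitOn, List.splitOnP_nil, pvHit_nil]
  | cons i cs ih =>
    intro c flag
    obtain ⟨h, t, hw⟩ := List.exists_cons_of_ne_nil (List.splitOnP_ne_nil (· == ' ') cs)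
    have hws : cs.splitOn ' ' = h :: t := hw
    by_cases hsp : i = ' '
    · subst hsp
      have hstep : pvStepA (c, flag) ' ' = (c, false) := by simp [pvStepA]
      have hsplit : (' ' :: cs).splitOn ' ' = [] :: cs.splitOn ' ' := by
        simp [List.splitOn, List.splitOnP_cons]
      simp only [List.foldl_cons, hstep]
      rw [ih c false]
      cases flag <;> simp [hsplit, hws, pvHit_nil, add_comm]
    · have hdot : (i :: cs).splitOn ' ' = (i :: h) :: t := by
        simp [List.splitOn, List.splitOnP_cons, hsp, hw]
      by_cases hxy : i = 'y' ∨ i = 'x'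
      · -- i is x or y: A counts iff flag was false; B's first segment contains it
        have hhit : pvHit (i :: h) = 1 := by
          rw [pvHit_eq]
          rcases hxy with h1 | h1 <;> subst h1 <;> simp
        cases flag with
        | false =>
          have hstep : pvStepA (c, false) i = (c + 1, true) := by
            rcases hxy with h1 | h1 <;> subst h1 <;> simp [pvStepA]
          simp only [List.foldl_cons, hstep]
          rw [ih (c + 1) true]
          simp [hdot, hws, hhit]; ring
        | true =>
          have hstep : pvStepA (c, true) i = (c, true) := by
            rcases hxy with h1 | h1 <;> subst h1 <;> simp [pvStepA]
          simp only [List.foldl_cons, hstep]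
          rw [ih c true]
          simp [hdot, hws]
      · -- i is neither space, x nor y (possibly '.'): state unchanged, segment hit unchanged
        rw [not_or] at hxy
        have hstep : pvStepA (c, flag) i = (c, flag) := by
          simp [pvStepA, hsp, hxy.1, hxy.2]
        have hhit : pvHit (i :: h) = pvHit h := by
          rw [pvHit_eq, pvHit_eq]
          have h1 : ¬ ('x' = i) := fun e => hxy.2 e.symm
          have h2 : ¬ ('y' = i) := fun e => hxy.1 e.symm
          simp [List.mem_cons, h1, h2]
        simp only [List.foldl_cons, hstep]
        rw [ih c flag]
        simp [hdot, hws, hhit]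

-- ===== VERDICT (by name: the statement is the Claim_ definition above) =====
theorem contar_pal_xy_spec : Claim_equal_contar_pal_xy := by
  intro texto _
  unfold Spec_contar_pal_xy contar_pal_xy contar_pal_xy_alt
  rw [pvFoldA_eq]
  obtain ⟨h, t, hw⟩ := List.exists_cons_of_ne_nil (List.splitOnP_ne_nil (· == ' ') texto.toList)
  have hws : texto.toList.splitOn ' ' = h :: t := hw
  simp [hws, add_comm]
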